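-- pv_equiv track=rewrite | github.com/anjrew/Autonomous-Nerf-Turret | components/rl_controller/utils.py | get_priority_target_index
-- ===== SOURCE A (Python) =====
-- from typing import List, Optional
--
-- def get_priority_target_index(targets: List[dict], type: str,  target_ids: List[str]=[]) -> Optional[int]:
--     """
--     Returns the index of the highest priority target in the `targets` list based on the input `ids` and `type`.
--
--     Args:
--         targets: A list of dictionaries, each representing a target with the keys 'id' and 'type'.
--         type: A target type to prioritize if none of the target IDs are found.
--         target_ids: A list of target IDs to prioritize over the target types.
--
--     Returns:
--         The index of the highest priority target in the `targets` list. Returns 0 if no target is found.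
--
--     Example:
--         targets = [
--             {"id": "001", "type": "person"},
--             {"id": "002", "type": "vehicle"},
--             {"id": "003", "type": "person"}
--         ]
--         ids = ["003", "004"]
--         type = "vehicle"
--         index = get_priority_target_index(targets, ids, type)
--         # Returns 1 (index of the "002" target in the `targets` list)
--     """
--     if len(target_ids) > 0: # If there are target IDs just check if the target IDs face is in the list
--         assert type == "face", "The `type` argument must be 'face' if the `ids` argument is not empty, as these are face IDs."
--         for i, target in enumerate(targets):
--             if target.get("id", None) in target_ids:
--                 return i
--     else:
--         for i, target in enumerate(targets):
--             if target["type"] == 'person' and type == 'person':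
--                 # If the target is a person, check if it has a face
--                 for index, person in enumerate(targets):
--                     if person['type'] == 'face':
--                         return index
--                 return i # If no face is found, return the person
--
--             elif target["type"] == 'face' and  type == 'person':
--                 return i # Because a face part of a person
--
--             if target["type"] == type:
--                 return i
--     return None
-- ===== SOURCE B (Python) =====
-- from typing import List, Optional
--
--
-- def _first_index(items, pred):
--     """Index of the first item satisfying pred, or None."""
--     return next((i for i, x in enumerate(items) if pred(x)), None)
--
--
-- def get_priority_target_index(targets: List[dict], type: str, target_ids: List[str] = []) -> Optional[int]:
--     if len(target_ids) > 0:
--         assert type == "face", "The `type` argument must be 'face' if the `ids` argument is not empty, as these are face IDs."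
--         return _first_index(targets, lambda t: t.get("id", None) in target_ids)
--     if type == 'person':
--         # a face counts as (part of) a person and wins; otherwise the first person
--         face = _first_index(targets, lambda t: t['type'] == 'face')
--         return face if face is not None else _first_index(targets, lambda t: t['type'] == 'person')
--     return _first_index(targets, lambda t: t['type'] == type)
-- ===== Notes on version B (the rewrite author's own statement) =====
-- stated objective: simpler
-- what changed: Replaces A's single fused loop with its nested face re-scan by staged first-index-matching passes built on one generic first_index helper: an id pass when target_ids is given; for type 'person' a first-face pass falling back to a first-person pass; otherwise one first-match type pass.
import Mathlib
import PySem

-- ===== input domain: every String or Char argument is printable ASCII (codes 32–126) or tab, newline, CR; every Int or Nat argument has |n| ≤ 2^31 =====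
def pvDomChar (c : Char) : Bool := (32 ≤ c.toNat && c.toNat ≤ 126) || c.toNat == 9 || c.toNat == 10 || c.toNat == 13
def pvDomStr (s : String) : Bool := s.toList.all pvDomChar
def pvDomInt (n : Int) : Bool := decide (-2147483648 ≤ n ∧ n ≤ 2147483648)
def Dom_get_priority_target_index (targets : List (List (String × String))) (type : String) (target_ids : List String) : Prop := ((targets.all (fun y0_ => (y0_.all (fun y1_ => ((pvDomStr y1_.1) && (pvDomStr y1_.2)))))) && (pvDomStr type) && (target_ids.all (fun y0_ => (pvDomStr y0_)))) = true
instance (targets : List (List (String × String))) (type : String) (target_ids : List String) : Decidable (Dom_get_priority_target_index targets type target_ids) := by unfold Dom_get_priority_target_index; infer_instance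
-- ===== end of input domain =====

-- B replaces A's fused priority loop (with its nested face re-scan) by staged first-index passes over a generic first_index helper; objective: simpler.


-- dict lookup helper shared by both ports: t["type"] (total with default ""; Pre_ guarantees the key is
-- present wherever the Python actually reads it) and 'has key "type"'
def pvGetType (t : List (String × String)) : String := (PySem.Dict.ofList t).getD "type" ""
def pvHasType (t : List (String × String)) : Bool := (PySem.Dict.ofList t).contains "type"

-- ===== PORT A =====
-- 'for i, target in enumerate(targets): if target.get("id", None) in target_ids: return i'
def aIdLoop (ts : List (List (String × String))) (target_ids : List String) (i : Int) : Option Int :=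
  match ts with
  | [] => none
  | t :: rest =>
    match (PySem.Dict.ofList t).get? "id" with
    | some v => if v ∈ target_ids then some i else aIdLoop rest target_ids (i + 1)
    | none => aIdLoop rest target_ids (i + 1)

-- inner 'for index, person in enumerate(targets): if person['type'] == 'face': return index'
def aFaceLoop (ts : List (List (String × String))) (j : Int) : Option Int :=
  match ts with
  | [] => none
  | t :: rest => if pvGetType t = "face" then some j else aFaceLoop rest (j + 1)

-- A's else-branch loop; 'allT' is the full list (the inner loop re-scans it from the start)
def aMainLoop (allT ts : List (List (String × String))) (type : String) (i : Int) : Option Int :=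
  match ts with
  | [] => none
  | t :: rest =>
    if pvGetType t = "person" ∧ type = "person" then
      match aFaceLoop allT 0 with
      | some j => some j
      | none => some i
    else if pvGetType t = "face" ∧ type = "person" then some i
    else if pvGetType t = type then some i
    else aMainLoop allT rest type (i + 1)

def get_priority_target_index (targets : List (List (String × String))) (type : String) (target_ids : List String) : Option Int :=
  if target_ids.length > 0 then aIdLoop targets target_ids 0
  else aMainLoop targets targets type 0

-- ===== PORT B =====
-- _first_index(items, pred) = next((i for i, x in enumerate(items) if pred(x)), None)
def bFirstIndex (items : List (List (String × String))) (p : List (String × String) → Bool) : Option Int :=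
  (items.findIdx? p).map Int.ofNat

def get_priority_target_index_alt (targets : List (List (String × String))) (type : String) (target_ids : List String) : Option Int :=
  if target_ids.length > 0 then
    bFirstIndex targets (fun t =>
      match (PySem.Dict.ofList t).get? "id" with
      | some v => decide (v ∈ target_ids)
      | none => false)
  else if type = "person" then
    match bFirstIndex targets (fun t => pvGetType t == "face") with
    | some i => some i
    | none => bFirstIndex targets (fun t => pvGetType t == "person")
  else bFirstIndex targets (fun t => pvGetType t == type)

-- ===== PRECONDITION & SPEC =====
-- Pre_ excludes exactly the inputs on which the Python A raises: the assert (non-empty target_ids with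
-- type ≠ "face" → AssertionError), and a KeyError on a dict without a "type" key that the else-branch
-- actually reads before returning (it reads none iff some target before the first key-less one already
-- matches the sought type — "face" when type is "person", else type itself).
def Pre_get_priority_target_index (targets : List (List (String × String))) (type : String) (target_ids : List String) : Prop :=
  (target_ids ≠ [] → type = "face") ∧
  (target_ids = [] →
    (targets.all (fun t => pvHasType t) = true ∨
     ∃ t ∈ targets.takeWhile (fun t => pvHasType t),
       pvGetType t = (if type = "person" then "face" else type)))
instance (targets : List (List (String × String))) (type : String) (target_ids : List String) : Decidable (Pre_get_priority_target_index targets type target_ids) := by unfold Pre_get_priority_target_index; infer_instance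

def pvWitness_get_priority_target_index : (List (List (String × String))) × String × List String :=
  ([[("type", "person")], [("type", "face")]], "person", [])

def Spec_get_priority_target_index (targets : List (List (String × String))) (type : String) (target_ids : List String) (out : Option Int) : Prop := out = get_priority_target_index_alt targets type target_ids
instance (targets : List (List (String × String))) (type : String) (target_ids : List String) (out : Option Int) : Decidable (Spec_get_priority_target_index targets type target_ids out) := by unfold Spec_get_priority_target_index; infer_instance

-- ===== CLAIM (what is proved, stated in full; the proofs are below) =====
def Claim_equal_get_priority_target_index : Prop := ∀ (targets : List (List (String × String))) (type : String) (target_ids : List String), Dom_get_priority_target_index targets type target_ids → Pre_get_priority_target_index targets type target_ids → Spec_get_priority_target_index targets type target_ids (get_priority_target_index targets type target_ids)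

-- ===== LEMMAS AND PROOFS =====

-- proof-only bridge: an accumulator-style first-index scan, the common shape of A's loops
def pvScan (ts : List (List (String × String))) (p : List (String × String) → Bool) (i : Int) : Option Int :=
  match ts with
  | [] => none
  | t :: rest => if p t then some i else pvScan rest p (i + 1)

theorem pvScan_eq_findIdx? (ts : List (List (String × String))) (p : List (String × String) → Bool) (i : Int) :
    pvScan ts p i = (ts.findIdx? p).map (fun n => i + (n : Int)) := by
  induction ts generalizing i with
  | nil => rfl
  | cons t rest ih =>
    simp only [pvScan, List.findIdx?_cons]
    by_cases h : p t
    · simp [h]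
    · simp only [h, ih]
      cases rest.findIdx? p
      · simp
      · simp; omega

theorem pvScan_eq_bFirstIndex (ts : List (List (String × String))) (p : List (String × String) → Bool) :
    pvScan ts p 0 = bFirstIndex ts p := by
  rw [pvScan_eq_findIdx?, bFirstIndex]
  cases ts.findIdx? p <;> simp [Int.ofNat_eq_natCast]

-- A's id loop is the scan with B's id predicate
theorem aIdLoop_eq_scan (ts : List (List (String × String))) (ids : List String) (i : Int) :
    aIdLoop ts ids i =
      pvScan ts (fun t =>
        match (PySem.Dict.ofList t).get? "id" with
        | some v => decide (v ∈ ids)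
        | none => false) i := by
  induction ts generalizing i with
  | nil => rfl
  | cons t rest ih =>
    rcases Option.eq_none_or_eq_some ((PySem.Dict.ofList t).get? "id") with h | ⟨v, h⟩
    · simp [aIdLoop, pvScan, h, ih]
    · by_cases hv : v ∈ ids <;> simp [aIdLoop, pvScan, h, hv, ih]

theorem aFaceLoop_eq_scan (ts : List (List (String × String))) (j : Int) :
    aFaceLoop ts j = pvScan ts (fun t => pvGetType t == "face") j := by
  induction ts generalizing j with
  | nil => rfl
  | cons t rest ih =>
    simp only [aFaceLoop, pvScan]
    by_cases h : pvGetType t = "face" <;> simp [h, ih]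

-- for type ≠ "person" A's else-loop is just the single type scan
theorem aMainLoop_eq_scan (allT ts : List (List (String × String))) (type : String)
    (hty : type ≠ "person") (i : Int) :
    aMainLoop allT ts type i = pvScan ts (fun t => pvGetType t == type) i := by
  induction ts generalizing i with
  | nil => rfl
  | cons t rest ih =>
    simp only [aMainLoop, pvScan]
    by_cases h : pvGetType t = type
    · simp [h, hty]
    · simp [h, hty, ih]

-- for type = "person": as long as the full list has no face before position i (expressed by the
-- hypothesis that the global face scan equals the face scan of the remaining suffix), A's loop is
-- 'first face, else first person'
theorem aMainLoop_person (allT ts : List (List (String × String))) (i : Int)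
    (H : aFaceLoop allT 0 = pvScan ts (fun t => pvGetType t == "face") i) :
    aMainLoop allT ts "person" i =
      match pvScan ts (fun t => pvGetType t == "face") i with
      | some j => some j
      | none => pvScan ts (fun t => pvGetType t == "person") i := by
  induction ts generalizing i with
  | nil => simp [aMainLoop, pvScan]
  | cons t rest ih =>
    by_cases hf : pvGetType t = "face"
    · have hfp : ¬ (pvGetType t = "person" ∧ "person" = "person") := by
        intro hc; rw [hf] at hc; exact absurd hc.1 (by decide)
      simp only [aMainLoop, pvScan, if_neg hfp, hf, if_pos]
      simp
    · have hscan : pvScan (t :: rest) (fun t => pvGetType t == "face") i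
          = pvScan rest (fun t => pvGetType t == "face") (i + 1) := by
        simp [pvScan, hf]
      by_cases hp : pvGetType t = "person"
      · rw [hscan] at H ⊢
        simp only [aMainLoop, hp, and_self, if_pos, H]
        cases hc : pvScan rest (fun t => pvGetType t == "face") (i + 1) with
        | some j => simp
        | none => simp [pvScan, hp]
      · rw [hscan] at H ⊢
        simp only [aMainLoop, pvScan, hp, hf, false_and, if_false]
        have := ih (i + 1) H
        simpa [hp, hf] using this

-- ===== VERDICT (by name: the statement is the Claim_ definition above) =====
theorem get_priority_target_index_spec : Claim_equal_get_priority_target_index := by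
  intro targets type target_ids _ _
  unfold Spec_get_priority_target_index get_priority_target_index get_priority_target_index_alt
  by_cases hids : target_ids.length > 0
  · simp [hids, aIdLoop_eq_scan, pvScan_eq_bFirstIndex]
  · by_cases hty : type = "person"
    · subst hty
      simp only [hids, if_false]
      rw [aMainLoop_person targets targets 0 (aFaceLoop_eq_scan targets 0)]
      simp [pvScan_eq_bFirstIndex]
    · simp [hids, hty, aMainLoop_eq_scan targets targets type hty 0, pvScan_eq_bFirstIndex]
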